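-- pv_equiv track=rewrite | github.com/CarmelitaBraga/code-and-about | atal/lista1/dia_de_vacinacao.py | divide_grupo
-- ===== SOURCE A (Python) =====
-- def prioritario(idade):
--     return idade <= 9 or idade >= 80
--
-- def divide_grupo(lista_idades):
--     comum, prioridade = 0, 0
--     for i in lista_idades:
--         i = int(i)
--         if prioritario(i):
--             prioridade += 1
--         else:
--             comum += 1
--     return comum, prioridade
-- ===== SOURCE B (Python) =====
-- def _bisect_right(a, x):
--     lo, hi = 0, len(a)
--     while lo < hi:
--         mid = (lo + hi) // 2
--         if x < a[mid]:
--             hi = mid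
--         else:
--             lo = mid + 1
--     return lo
--
--
-- def _bisect_left(a, x):
--     lo, hi = 0, len(a)
--     while lo < hi:
--         mid = (lo + hi) // 2
--         if a[mid] < x:
--             lo = mid + 1
--         else:
--             hi = mid
--     return lo
--
--
-- def divide_grupo(lista_idades):
--     # Sort the ages; the two priority groups are then a prefix (ages <= 9) and a
--     # suffix (ages >= 80), whose sizes binary search finds at the boundaries.
--     s = sorted(int(i) for i in lista_idades)
--     prioridade = _bisect_right(s, 9) + (len(s) - _bisect_left(s, 80))
--     return len(s) - prioridade, prioridade
-- ===== Notes on version B (the rewrite author's own statement) =====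
-- stated objective: alternative
-- what changed: B sorts the ages and locates the two priority groups as a prefix (ages <= 9) and a suffix (ages >= 80) with hand-written binary searches at the thresholds, deriving comum by subtraction, instead of A's single loop classifying every element with the prioritario predicate.
import Mathlib
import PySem

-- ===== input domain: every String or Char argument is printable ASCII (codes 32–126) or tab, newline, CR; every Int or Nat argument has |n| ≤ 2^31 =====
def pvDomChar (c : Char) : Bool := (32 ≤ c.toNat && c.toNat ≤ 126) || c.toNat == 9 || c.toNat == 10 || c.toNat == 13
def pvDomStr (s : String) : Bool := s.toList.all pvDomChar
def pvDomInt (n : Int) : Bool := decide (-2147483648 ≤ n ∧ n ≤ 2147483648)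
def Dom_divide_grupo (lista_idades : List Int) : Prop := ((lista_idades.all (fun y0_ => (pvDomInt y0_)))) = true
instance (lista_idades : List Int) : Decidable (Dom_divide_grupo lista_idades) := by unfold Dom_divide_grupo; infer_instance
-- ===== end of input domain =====

-- B sorts the ages and finds the priority groups (a prefix <= 9 and a suffix >= 80) by binary search, instead of A's per-element classifying loop (objective: alternative; return value only, neither mutates its argument).


-- ===== PORT A =====
def prioritario (idade : Int) : Bool := idade ≤ 9 || idade ≥ 80

def divide_grupo (lista_idades : List Int) : Int × Int :=
  lista_idades.foldl
    (fun (st : Int × Int) i =>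
      if prioritario i then (st.1, st.2 + 1) else (st.1 + 1, st.2))
    (0, 0)

-- ===== PORT B =====
-- hand-written `while lo < hi` binary searches of Source B: the loop is the obvious recursion on
-- the shrinking interval; `fuel` (called with hi - lo, an upper bound on the iteration count)
-- is only a structural termination gadget and is never exhausted while lo < hi.
-- a[mid] is always in range when called as below, so getD's default is never used.
def bisectRightB (a : List Int) (x : Int) (fuel lo hi : Nat) : Nat :=
  match fuel with
  | 0 => lo
  | fuel + 1 =>
    if lo < hi then
      let mid := (lo + hi) / 2
      if x < a.getD mid 0 then bisectRightB a x fuel lo mid else bisectRightB a x fuel (mid + 1) hi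
    else lo

def bisectLeftB (a : List Int) (x : Int) (fuel lo hi : Nat) : Nat :=
  match fuel with
  | 0 => lo
  | fuel + 1 =>
    if lo < hi then
      let mid := (lo + hi) / 2
      if a.getD mid 0 < x then bisectLeftB a x fuel (mid + 1) hi else bisectLeftB a x fuel lo mid
    else lo

def divide_grupo_alt (lista_idades : List Int) : Int × Int :=
  -- s = sorted(int(i) for i in lista_idades); int(i) is the identity on ints
  let s := PySem.List.sorted lista_idades (fun i => i) false
  let prioridade : Nat :=
    bisectRightB s 9 s.length 0 s.length + (s.length - bisectLeftB s 80 s.length 0 s.length)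
  ((s.length : Int) - (prioridade : Int), (prioridade : Int))

-- ===== PRECONDITION & SPEC =====
def Spec_divide_grupo (lista_idades : List Int) (out : Int × Int) : Prop := out = divide_grupo_alt lista_idades
instance (lista_idades : List Int) (out : Int × Int) : Decidable (Spec_divide_grupo lista_idades out) := by unfold Spec_divide_grupo; infer_instance

-- ===== CLAIM (what is proved, stated in full; the proofs are below) =====
def Claim_equal_divide_grupo : Prop := ∀ (lista_idades : List Int), Dom_divide_grupo lista_idades → Spec_divide_grupo lista_idades (divide_grupo lista_idades)

-- ===== LEMMAS AND PROOFS =====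

theorem divide_grupo_foldl (l : List Int) (c p : Int) :
    l.foldl
      (fun (st : Int × Int) i =>
        if prioritario i then (st.1, st.2 + 1) else (st.1 + 1, st.2))
      (c, p)
    = (c + ((l.length : Int) - ((l.filter (fun i => prioritario i)).length : Int)),
       p + ((l.filter (fun i => prioritario i)).length : Int)) := by
  induction l generalizing c p with
  | nil => simp
  | cons x xs ih =>
    by_cases h : prioritario x = true <;>
      simp [List.foldl, h, ih] <;> ring_nf

theorem pairwise_mono (a : List Int) (hs : a.Pairwise (· ≤ ·))
    (i j : Nat) (hij : i ≤ j) (hj : j < a.length) :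
    a[i]'(lt_of_le_of_lt hij hj) ≤ a[j] := by
  rcases Nat.lt_or_ge i j with h | h
  · exact (List.pairwise_iff_getElem.mp hs) i j (lt_of_le_of_lt hij hj) hj h
  · have : i = j := le_antisymm hij h
    subst this; exact le_refl _

theorem bisectRightB_spec (a : List Int) (x : Int) (hs : a.Pairwise (· ≤ ·)) :
    ∀ (fuel lo hi : Nat), hi - lo ≤ fuel → lo ≤ hi → hi ≤ a.length →
      (∀ j (hj : j < a.length), j < lo → a[j] ≤ x) →
      (∀ j (hj : j < a.length), hi ≤ j → x < a[j]) →
      bisectRightB a x fuel lo hi ≤ a.length ∧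
        (∀ j (hj : j < a.length), j < bisectRightB a x fuel lo hi → a[j] ≤ x) ∧
        (∀ j (hj : j < a.length), bisectRightB a x fuel lo hi ≤ j → x < a[j]) := by
  intro fuel
  induction fuel with
  | zero =>
    intro lo hi hn hlh hhi hpre hsuf
    have : lo = hi := by omega
    subst this
    rw [bisectRightB]
    exact ⟨by omega, fun j hj hjl => hpre j hj hjl, fun j hj hlj => hsuf j hj hlj⟩
  | succ fuel ih =>
    intro lo hi hn hlh hhi hpre hsuf
    rw [bisectRightB]
    by_cases hlt : lo < hi
    · simp only [hlt, if_true]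
      have hmidlt : (lo + hi) / 2 < a.length := by omega
      have hget : a.getD ((lo + hi) / 2) 0 = a[(lo + hi) / 2] := List.getD_eq_getElem a 0 hmidlt
      by_cases hx : x < a.getD ((lo + hi) / 2) 0
      · simp only [hx, if_true]
        refine ih lo ((lo + hi) / 2) (by omega) (by omega) (by omega) hpre ?_
        intro j hj hmj
        have := pairwise_mono a hs ((lo + hi) / 2) j hmj hj
        rw [hget] at hx; omega
      · simp only [hx, if_false]
        refine ih ((lo + hi) / 2 + 1) hi (by omega) (by omega) hhi ?_ hsuf
        intro j hj hjm
        have hjm' : j ≤ (lo + hi) / 2 := by omega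
        have := pairwise_mono a hs j ((lo + hi) / 2) hjm' hmidlt
        rw [hget] at hx; omega
    · simp only [hlt, if_false]
      have hle : lo = hi := by omega
      subst hle
      exact ⟨by omega, fun j hj hjl => hpre j hj hjl, fun j hj hlj => hsuf j hj hlj⟩

theorem bisectLeftB_spec (a : List Int) (x : Int) (hs : a.Pairwise (· ≤ ·)) :
    ∀ (fuel lo hi : Nat), hi - lo ≤ fuel → lo ≤ hi → hi ≤ a.length →
      (∀ j (hj : j < a.length), j < lo → a[j] < x) →
      (∀ j (hj : j < a.length), hi ≤ j → x ≤ a[j]) →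
      bisectLeftB a x fuel lo hi ≤ a.length ∧
        (∀ j (hj : j < a.length), j < bisectLeftB a x fuel lo hi → a[j] < x) ∧
        (∀ j (hj : j < a.length), bisectLeftB a x fuel lo hi ≤ j → x ≤ a[j]) := by
  intro fuel
  induction fuel with
  | zero =>
    intro lo hi hn hlh hhi hpre hsuf
    have : lo = hi := by omega
    subst this
    rw [bisectLeftB]
    exact ⟨by omega, fun j hj hjl => hpre j hj hjl, fun j hj hlj => hsuf j hj hlj⟩
  | succ fuel ih =>
    intro lo hi hn hlh hhi hpre hsuf
    rw [bisectLeftB]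
    by_cases hlt : lo < hi
    · simp only [hlt, if_true]
      have hmidlt : (lo + hi) / 2 < a.length := by omega
      have hget : a.getD ((lo + hi) / 2) 0 = a[(lo + hi) / 2] := List.getD_eq_getElem a 0 hmidlt
      by_cases hx : a.getD ((lo + hi) / 2) 0 < x
      · simp only [hx, if_true]
        refine ih ((lo + hi) / 2 + 1) hi (by omega) (by omega) hhi ?_ hsuf
        intro j hj hjm
        have hjm' : j ≤ (lo + hi) / 2 := by omega
        have := pairwise_mono a hs j ((lo + hi) / 2) hjm' hmidlt
        rw [hget] at hx; omega
      · simp only [hx, if_false]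
        refine ih lo ((lo + hi) / 2) (by omega) (by omega) (by omega) hpre ?_
        intro j hj hmj
        have := pairwise_mono a hs ((lo + hi) / 2) j hmj hj
        rw [hget] at hx; omega
    · simp only [hlt, if_false]
      have hle : lo = hi := by omega
      subst hle
      exact ⟨by omega, fun j hj hjl => hpre j hj hjl, fun j hj hlj => hsuf j hj hlj⟩

-- a list whose first r elements satisfy p and whose remaining elements do not has countP p = r
theorem countP_eq_of_split (p : Int → Bool) :
    ∀ (a : List Int) (r : Nat), r ≤ a.length →
      (∀ j (hj : j < a.length), j < r → p a[j] = true) →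
      (∀ j (hj : j < a.length), r ≤ j → p a[j] = false) →
      a.countP p = r := by
  intro a
  induction a with
  | nil =>
    intro r hr _ _
    have hr0 : r = 0 := Nat.le_zero.mp (by simpa using hr)
    simp [hr0]
  | cons y ys ih =>
    intro r hr hpre hsuf
    cases r with
    | zero =>
      have hy : p y = false := hsuf 0 (by simp) (by omega)
      have : ys.countP p = 0 := by
        apply ih 0 (by omega) (by intro j hj hj0; omega)
        intro j hj _
        exact hsuf (j + 1) (by simpa using Nat.succ_lt_succ hj) (by omega)
      simp [hy, this]
    | succ s =>
      have hy : p y = true := hpre 0 (by simp) (by omega)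
      have hys : ys.countP p = s := by
        apply ih s (by simpa using hr)
        · intro j hj hjs
          exact hpre (j + 1) (by simpa using Nat.succ_lt_succ hj) (by omega)
        · intro j hj hsj
          exact hsuf (j + 1) (by simpa using Nat.succ_lt_succ hj) (by omega)
      simp [hy, hys]

theorem count_three_way (l : List Int) :
    l.countP (fun i => prioritario i) + l.countP (fun i => decide (i < 80))
      = l.countP (fun i => decide (i ≤ 9)) + l.length := by
  induction l with
  | nil => rfl
  | cons y ys ih =>
    rw [List.countP_cons, List.countP_cons, List.countP_cons, List.length_cons]
    by_cases h9 : y ≤ 9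
    · rw [if_pos (show (fun i => prioritario i) y = true by
            simp only [prioritario, Bool.or_eq_true, decide_eq_true_eq]; exact Or.inl h9),
          if_pos (show (fun i : Int => decide (i < 80)) y = true by
            simp only [decide_eq_true_eq]; omega),
          if_pos (show (fun i : Int => decide (i ≤ 9)) y = true by
            simp only [decide_eq_true_eq]; exact h9)]
      omega
    · by_cases h80 : y < 80
      · rw [if_neg (show ¬ (fun i => prioritario i) y = true by
              simp only [prioritario, Bool.or_eq_true, decide_eq_true_eq]; omega),
            if_pos (show (fun i : Int => decide (i < 80)) y = true by
              simp only [decide_eq_true_eq]; exact h80),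
            if_neg (show ¬ (fun i : Int => decide (i ≤ 9)) y = true by
              simp only [decide_eq_true_eq]; exact h9)]
        omega
      · rw [if_pos (show (fun i => prioritario i) y = true by
              simp only [prioritario, Bool.or_eq_true, decide_eq_true_eq]; omega),
            if_neg (show ¬ (fun i : Int => decide (i < 80)) y = true by
              simp only [decide_eq_true_eq]; exact h80),
            if_neg (show ¬ (fun i : Int => decide (i ≤ 9)) y = true by
              simp only [decide_eq_true_eq]; exact h9)]
        omega

-- ===== VERDICT (by name: the statement is the Claim_ definition above) =====
theorem divide_grupo_spec : Claim_equal_divide_grupo := by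
  intro l _
  show divide_grupo l = divide_grupo_alt l
  have hA : divide_grupo l
      = (((l.length : Int) - ((l.filter (fun i => prioritario i)).length : Int)),
         ((l.filter (fun i => prioritario i)).length : Int)) := by
    simpa using divide_grupo_foldl l 0 0
  set s := PySem.List.sorted l (fun i => i) false with hsdef
  have hperm : s.Perm l := PySem.List.sorted_perm l (fun i => i) false
  have hpw : s.Pairwise (· ≤ ·) := by
    simpa using PySem.List.sorted_pairwise l (fun i => i)
  -- the binary searches count the two boundary groups in s
  have hbr := bisectRightB_spec s 9 hpw s.length 0 s.length (by omega) (by omega) (le_refl _)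
      (by intro j hj hj0; omega) (by intro j hj hlj; omega)
  have hbl := bisectLeftB_spec s 80 hpw s.length 0 s.length (by omega) (by omega) (le_refl _)
      (by intro j hj hj0; omega) (by intro j hj hlj; omega)
  have hcr : s.countP (fun i => decide (i ≤ 9)) = bisectRightB s 9 s.length 0 s.length := by
    apply countP_eq_of_split _ s _ hbr.1
    · intro j hj hjr; simpa using hbr.2.1 j hj hjr
    · intro j hj hrj; simpa using not_le.mpr (hbr.2.2 j hj hrj)
  have hcl : s.countP (fun i => decide (i < 80)) = bisectLeftB s 80 s.length 0 s.length := by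
    apply countP_eq_of_split _ s _ hbl.1
    · intro j hj hjr; simpa using hbl.2.1 j hj hjr
    · intro j hj hrj; simpa using not_lt.mpr (hbl.2.2 j hj hrj)
  -- transfer counts along the permutation
  have hcp : l.countP (fun i => prioritario i) = s.countP (fun i => prioritario i) :=
    (hperm.countP_eq _).symm
  have hc9 : l.countP (fun i => decide (i ≤ 9)) = s.countP (fun i => decide (i ≤ 9)) :=
    (hperm.countP_eq _).symm
  have hc80 : l.countP (fun i => decide (i < 80)) = s.countP (fun i => decide (i < 80)) :=
    (hperm.countP_eq _).symm
  have hlen : s.length = l.length := hperm.length_eq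
  have hfilter : (l.filter (fun i => prioritario i)).length = l.countP (fun i => prioritario i) :=
    List.countP_eq_length_filter.symm
  have h3 := count_three_way l
  have hble : bisectLeftB s 80 s.length 0 s.length ≤ s.length := hbl.1
  have hcle : l.countP (fun i => prioritario i) ≤ l.length := List.countP_le_length
  rw [hA]
  show _ = divide_grupo_alt l
  simp only [divide_grupo_alt, ← hsdef]
  have hpri : bisectRightB s 9 s.length 0 s.length + (s.length - bisectLeftB s 80 s.length 0 s.length)
      = l.countP (fun i => prioritario i) := by
    rw [← hcr, ← hcl, ← hc9, ← hc80]
    have hcl_le : l.countP (fun i => decide (i < 80)) ≤ l.length := List.countP_le_length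
    omega
  rw [hpri, hfilter, hlen]
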